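-- pv_equiv track=rewrite | github.com/pypi-data/pypi-mirror-368 | packages/pacificpy/pacificpy-0.0.1.tar.gz/pacificpy-0.0.1/pacificpy/routing/method_infer.py | _infer_from_name
-- ===== SOURCE A (Python) =====
-- from typing import List, Optional
--
-- def _infer_from_name(func_name: str) -> Optional[str]:
--     """
--     Infer HTTP method from function name prefix.
--
--     Args:
--         func_name: Name of the function
--
--     Returns:
--         Inferred HTTP method or None if no match
--     """
--     # Direct mappings
--     prefix_map = {
--         'get_': 'GET',
--         'post_': 'POST',
--         'put_': 'PUT',
--         'delete_': 'DELETE',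
--         'patch_': 'PATCH',
--         'head_': 'HEAD',
--         'options_': 'OPTIONS',
--     }
--
--     # Special cases
--     if func_name.startswith('create_'):
--         return 'POST'
--
--     if func_name.startswith('update_'):
--         return 'PUT'
--
--     # Check standard prefixes
--     for prefix, method in prefix_map.items():
--         if func_name.startswith(prefix):
--             return method
--
--     return None
-- ===== SOURCE B (Python) =====
-- from typing import Optional
--
-- _TOKEN_MAP = {
--     'get': 'GET',
--     'post': 'POST',
--     'put': 'PUT',
--     'delete': 'DELETE',
--     'patch': 'PATCH',
--     'head': 'HEAD',
--     'options': 'OPTIONS',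
--     'create': 'POST',
--     'update': 'PUT',
-- }
--
-- def _infer_from_name(func_name: str) -> Optional[str]:
--     head, sep, _tail = func_name.partition('_')
--     return _TOKEN_MAP.get(head) if sep else None
-- ===== Notes on version B (the rewrite author's own statement) =====
-- stated objective: simpler
-- what changed: B splits the name once at the first underscore and does a single dict lookup keyed by the bare token, replacing A's two special-case startswith branches and its loop of startswith tests over underscore-suffixed prefixes.
import Mathlib
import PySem

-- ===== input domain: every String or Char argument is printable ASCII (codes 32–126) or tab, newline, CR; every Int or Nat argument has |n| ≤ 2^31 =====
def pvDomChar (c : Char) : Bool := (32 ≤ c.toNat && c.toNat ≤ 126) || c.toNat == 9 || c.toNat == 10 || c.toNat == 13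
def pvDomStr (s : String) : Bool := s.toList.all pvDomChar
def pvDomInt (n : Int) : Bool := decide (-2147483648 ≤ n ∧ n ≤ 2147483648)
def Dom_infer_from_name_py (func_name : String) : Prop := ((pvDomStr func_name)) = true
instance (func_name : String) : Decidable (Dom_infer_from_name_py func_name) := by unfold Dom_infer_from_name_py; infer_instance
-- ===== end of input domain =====

-- B replaces A's special-case branches and startswith loop by one partition('_') plus a single token-keyed dict lookup (objective: simpler).


-- ===== PORT A =====
-- the 'for prefix, method in prefix_map.items():' loop with its early return
def pvScanPrefixes (func_name : String) : List (String × String) → Option String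
  | [] => none
  | (p, m) :: rest =>
      if PySem.Str.startswith func_name p then some m else pvScanPrefixes func_name rest

def infer_from_name_py (func_name : String) : Option String :=
  let prefix_map : PySem.Dict String String := PySem.Dict.ofList
    [("get_", "GET"), ("post_", "POST"), ("put_", "PUT"), ("delete_", "DELETE"),
     ("patch_", "PATCH"), ("head_", "HEAD"), ("options_", "OPTIONS")]
  if PySem.Str.startswith func_name "create_" then some "POST"
  else if PySem.Str.startswith func_name "update_" then some "PUT"
  else pvScanPrefixes func_name prefix_map.items

-- ===== PORT B =====
-- Python's func_name.partition('_') restricted to what B uses: (chars before the first '_', whether a '_' was found); exact for the one-char separator '_'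
def pvPartitionUnd : List Char → List Char × Bool
  | [] => ([], false)
  | c :: rest =>
      if c = '_' then ([], true)
      else
        let r := pvPartitionUnd rest
        (c :: r.1, r.2)

def pvTokenMap : PySem.Dict String String := PySem.Dict.ofList
  [("get", "GET"), ("post", "POST"), ("put", "PUT"), ("delete", "DELETE"),
   ("patch", "PATCH"), ("head", "HEAD"), ("options", "OPTIONS"),
   ("create", "POST"), ("update", "PUT")]

def infer_from_name_py_alt (func_name : String) : Option String :=
  let r := pvPartitionUnd func_name.toList
  if r.2 then pvTokenMap.get? (String.ofList r.1) else none

-- ===== PRECONDITION & SPEC =====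
def Spec_infer_from_name_py (func_name : String) (out : Option String) : Prop := out = infer_from_name_py_alt func_name
instance (func_name : String) (out : Option String) : Decidable (Spec_infer_from_name_py func_name out) := by unfold Spec_infer_from_name_py; infer_instance

-- ===== CLAIM (what is proved, stated in full; the proofs are below) =====
def Claim_equal_infer_from_name_py : Prop := ∀ (func_name : String), Dom_infer_from_name_py func_name → Spec_infer_from_name_py func_name (infer_from_name_py func_name)

-- ===== LEMMAS AND PROOFS =====

-- a "token_"-prefix test is exactly: partition at the first '_' yields (token, true)
lemma pv_prefix_iff_partition (t : List Char) (ht : '_' ∉ t) (cs : List Char) :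
    (t ++ ['_']) <+: cs ↔ pvPartitionUnd cs = (t, true) := by
  induction t generalizing cs with
  | nil =>
    cases cs with
    | nil => simp [pvPartitionUnd]
    | cons c rest =>
      by_cases hc : c = '_'
      · simp [pvPartitionUnd, hc, List.cons_prefix_cons]
      · simp [pvPartitionUnd, hc, List.cons_prefix_cons, Ne.symm hc]
  | cons a t' ih =>
    have ha : a ≠ '_' := fun h => ht (h ▸ List.mem_cons_self)
    have ht' : '_' ∉ t' := fun h => ht (List.mem_cons_of_mem _ h)
    cases cs with
    | nil => simp [pvPartitionUnd]
    | cons c rest =>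
      by_cases hc : c = a
      · subst hc
        simp [pvPartitionUnd, ha, List.cons_prefix_cons, ih ht' rest, Prod.ext_iff]
      · by_cases hcu : c = '_' <;>
          simp [pvPartitionUnd, hcu, List.cons_prefix_cons, Prod.ext_iff, ha, hc, Ne.symm hc]

lemma pv_startswith_eq (t : List Char) (ht : '_' ∉ t) (cs : List Char) :
    PySem.Chars.startswith cs (t ++ ['_']) =
      (decide (pvPartitionUnd cs = (t, true))) := by
  by_cases h : (t ++ ['_']) <+: cs
  · have h1 : pvPartitionUnd cs = (t, true) := (pv_prefix_iff_partition t ht cs).mp h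
    simp [(PySem.Chars.startswith_iff cs (t ++ ['_'])).mpr h, h1]
  · have h2 : pvPartitionUnd cs ≠ (t, true) := fun hh => h ((pv_prefix_iff_partition t ht cs).mpr hh)
    have h3 : PySem.Chars.startswith cs (t ++ ['_']) = false := by
      rw [← Bool.not_eq_true, PySem.Chars.startswith_iff]; exact h
    simp [h3, h2]

-- ===== VERDICT (by name: the statement is the Claim_ definition above) =====
theorem infer_from_name_py_spec : Claim_equal_infer_from_name_py := by
  intro s _
  unfold Spec_infer_from_name_py infer_from_name_py infer_from_name_py_alt
  simp only [pvScanPrefixes,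
    show (PySem.Dict.ofList [("get_", "GET"), ("post_", "POST"), ("put_", "PUT"), ("delete_", "DELETE"),
      ("patch_", "PATCH"), ("head_", "HEAD"), ("options_", "OPTIONS")]).items
      = [("get_", "GET"), ("post_", "POST"), ("put_", "PUT"), ("delete_", "DELETE"),
      ("patch_", "PATCH"), ("head_", "HEAD"), ("options_", "OPTIONS")] from rfl,
    PySem.Str.startswith_eq]
  rw [show "create_".toList = "create".toList ++ ['_'] from rfl, pv_startswith_eq _ (by decide),
      show "update_".toList = "update".toList ++ ['_'] from rfl, pv_startswith_eq _ (by decide),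
      show "get_".toList = "get".toList ++ ['_'] from rfl, pv_startswith_eq _ (by decide),
      show "post_".toList = "post".toList ++ ['_'] from rfl, pv_startswith_eq _ (by decide),
      show "put_".toList = "put".toList ++ ['_'] from rfl, pv_startswith_eq _ (by decide),
      show "delete_".toList = "delete".toList ++ ['_'] from rfl, pv_startswith_eq _ (by decide),
      show "patch_".toList = "patch".toList ++ ['_'] from rfl, pv_startswith_eq _ (by decide),
      show "head_".toList = "head".toList ++ ['_'] from rfl, pv_startswith_eq _ (by decide),
      show "options_".toList = "options".toList ++ ['_'] from rfl, pv_startswith_eq _ (by decide)]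
  rcases hp : pvPartitionUnd s.toList with ⟨h, b⟩
  cases b with
  | false => simp
  | true =>
    by_cases h1 : h = ['c', 'r', 'e', 'a', 't', 'e']
    · subst h1; decide
    by_cases h2 : h = ['u', 'p', 'd', 'a', 't', 'e']
    · subst h2; decide
    by_cases h3 : h = ['g', 'e', 't']
    · subst h3; decide
    by_cases h4 : h = ['p', 'o', 's', 't']
    · subst h4; decide
    by_cases h5 : h = ['p', 'u', 't']
    · subst h5; decide
    by_cases h6 : h = ['d', 'e', 'l', 'e', 't', 'e']
    · subst h6; decide
    by_cases h7 : h = ['p', 'a', 't', 'c', 'h']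
    · subst h7; decide
    by_cases h8 : h = ['h', 'e', 'a', 'd']
    · subst h8; decide
    by_cases h9 : h = ['o', 'p', 't', 'i', 'o', 'n', 's']
    · subst h9; decide
    have key : ∀ t : String, h ≠ t.toList → t ≠ String.ofList h := by
      intro t hne he
      exact hne (by rw [he, String.toList_ofList])
    have hnone : pvTokenMap.get? (String.ofList h) = none := by
      simp [PySem.Dict.get?,
        show pvTokenMap.items = [("get", "GET"), ("post", "POST"), ("put", "PUT"),
          ("delete", "DELETE"), ("patch", "PATCH"), ("head", "HEAD"), ("options", "OPTIONS"),
          ("create", "POST"), ("update", "PUT")] from rfl,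
        key "create" h1, key "update" h2, key "get" h3, key "post" h4, key "put" h5, key "delete" h6, key "patch" h7, key "head" h8, key "options" h9]
    simp [h1, h2, h3, h4, h5, h6, h7, h8, h9, hnone]
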